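-- pv_equiv track=rewrite | github.com/Freshjelly/zonepoint | FX/Phase1/fx_news_digest_ja.py | _pack_blocks_to_limit
-- ===== SOURCE A (Python) =====
-- from typing import List, Optional, Tuple
--
-- def _pack_blocks_to_limit(header: str, blocks: List[str], limit: int = 2000) -> Tuple[str, int]:
--     message = header
--     used = 0
--     for blk in blocks:
--         candidate = message + "\n\n" + blk
--         if len(candidate) <= limit:
--             message = candidate
--             used += 1
--             continue
--         # If nothing added yet, try to truncate first block to fit
--         if used == 0:
--             available = limit - len(header) - 2
--             if available > 10:  # ensure minimal room
--                 short = blk[: available - 1] + "…"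
--                 message = header + "\n\n" + short
--                 used = 1
--         break
--     return message, used
-- ===== SOURCE B (Python) =====
-- from typing import List, Tuple
--
-- def _pack_blocks_to_limit(header: str, blocks: List[str], limit: int = 2000) -> Tuple[str, int]:
--     # Prefix sums of block costs, then binary search for the largest fitting
--     # prefix count (prefix is strictly increasing, so this equals the greedy cut).
--     prefix = [len(header)]
--     for b in blocks:
--         prefix.append(prefix[-1] + len(b) + 2)
--     lo, hi = 0, len(blocks)
--     while lo < hi:
--         mid = (lo + hi + 1) // 2
--         if prefix[mid] <= limit:
--             lo = mid
--         else:
--             hi = mid - 1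
--     k = lo
--     if k == 0 and blocks:
--         available = limit - len(header) - 2
--         if available > 10:
--             return header + "\n\n" + blocks[0][:available - 1] + "…", 1
--         return header, 0
--     return "\n\n".join([header] + blocks[:k]), k
-- ===== Notes on version B (the rewrite author's own statement) =====
-- stated objective: alternative
-- what changed: A greedily grows the message string block by block and stops at the first overflow; B precomputes the strictly increasing prefix sums of block costs (len(blk)+2), binary-searches for the largest k whose prefix length fits the limit, and builds the result with a single '\n\n'.join, keeping A's truncation fallback when no block fits.
import Mathlib
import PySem

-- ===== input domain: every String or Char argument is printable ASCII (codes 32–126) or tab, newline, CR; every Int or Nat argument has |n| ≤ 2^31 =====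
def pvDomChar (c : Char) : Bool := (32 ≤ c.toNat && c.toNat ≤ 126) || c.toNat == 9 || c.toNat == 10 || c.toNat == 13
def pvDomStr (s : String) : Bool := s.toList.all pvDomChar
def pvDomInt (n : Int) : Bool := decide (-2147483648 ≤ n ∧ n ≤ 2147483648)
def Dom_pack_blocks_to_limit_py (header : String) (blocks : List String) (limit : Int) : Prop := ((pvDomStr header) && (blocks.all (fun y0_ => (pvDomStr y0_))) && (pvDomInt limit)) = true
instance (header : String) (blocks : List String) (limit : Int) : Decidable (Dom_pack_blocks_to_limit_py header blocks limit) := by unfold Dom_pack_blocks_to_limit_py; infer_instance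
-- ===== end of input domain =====

-- B replaces A's greedy grow-the-string loop by prefix sums of block costs plus a binary
-- search for the largest fitting prefix, followed by one join (alternative algorithm).

-- ===== PORT A =====
-- A's for-loop: message is grown string by string; `break` is the non-recursive branches.
def pvALoop (header : List Char) (limit : Int) :
    List (List Char) → List Char → Int → (List Char × Int)
  | [], message, used => (message, used)
  | blk :: rest, message, used =>
    let candidate := message ++ ['\n', '\n'] ++ blk
    if (PySem.Chars.len candidate : Int) ≤ limit then
      pvALoop header limit rest candidate (used + 1)
    else if used = 0 then
      let available := limit - (PySem.Chars.len header : Int) - 2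
      if available > 10 then
        let short := PySem.Chars.slice blk none (some (available - 1)) ++ ['…']
        (header ++ ['\n', '\n'] ++ short, 1)
      else (message, used)
    else (message, used)

def pack_blocks_to_limit_py (header : String) (blocks : List String) (limit : Int) : String × Int :=
  let r := pvALoop header.toList limit (blocks.map String.toList) header.toList 0
  (String.ofList r.1, r.2)

-- ===== PORT B =====
-- Source B's prefix-sum list: prefix = [len(header)]; for b in blocks: prefix.append(prefix[-1]+len(b)+2)
def pvPrefix (s : Int) : List (List Char) → List Int
  | [] => [s]
  | b :: rest => s :: pvPrefix (s + (PySem.Chars.len b : Int) + 2) rest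

-- Source B's while-loop binary search; prefix[mid] is always in range (1 ≤ mid ≤ len(blocks) < prefix length),
-- so the indexed access is ported as getD (exact there).
def pvBSearch (pre : List Int) (limit : Int) (lo hi : Nat) : Nat :=
  if _h : lo < hi then
    let mid := (lo + hi + 1) / 2
    if pre.getD mid 0 ≤ limit then pvBSearch pre limit mid hi
    else pvBSearch pre limit lo (mid - 1)
  else lo
termination_by hi - lo
decreasing_by all_goals omega

def pack_blocks_to_limit_py_alt (header : String) (blocks : List String) (limit : Int) : String × Int :=
  let h := header.toList
  let bs := blocks.map String.toList
  let pre := pvPrefix (PySem.Chars.len h : Int) bs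
  let k := pvBSearch pre limit 0 bs.length
  if k = 0 ∧ bs ≠ [] then
    let available := limit - (PySem.Chars.len h : Int) - 2
    if available > 10 then
      (String.ofList (h ++ ['\n', '\n'] ++ (PySem.Chars.slice (bs.headI) none (some (available - 1)) ++ ['…'])), 1)
    else (String.ofList h, 0)
  else
    (String.ofList (PySem.Chars.join ['\n', '\n'] (h :: bs.take k)), (k : Int))

-- ===== PRECONDITION & SPEC =====
def Spec_pack_blocks_to_limit_py (header : String) (blocks : List String) (limit : Int) (out : String × Int) : Prop := out = pack_blocks_to_limit_py_alt header blocks limit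
instance (header : String) (blocks : List String) (limit : Int) (out : String × Int) : Decidable (Spec_pack_blocks_to_limit_py header blocks limit out) := by unfold Spec_pack_blocks_to_limit_py; infer_instance

-- ===== CLAIM (what is proved, stated in full; the proofs are below) =====
def Claim_equal_pack_blocks_to_limit_py : Prop := ∀ (header : String) (blocks : List String) (limit : Int), Dom_pack_blocks_to_limit_py header blocks limit → Spec_pack_blocks_to_limit_py header blocks limit (pack_blocks_to_limit_py header blocks limit)

-- ===== LEMMAS AND PROOFS =====

-- Proof-side greedy count: the number of leading blocks A appends.
def pvCount (limit : Int) : List (List Char) → Int → Nat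
  | [], _ => 0
  | blk :: rest, total =>
    if total + 2 + (PySem.Chars.len blk : Int) > limit then 0
    else pvCount limit rest (total + 2 + (PySem.Chars.len blk : Int)) + 1

theorem pvCount_le (limit : Int) (bs : List (List Char)) (s : Int) :
    pvCount limit bs s ≤ bs.length := by
  induction bs generalizing s with
  | nil => simp [pvCount]
  | cons b rest ih =>
    simp only [pvCount, List.length_cons]
    split_ifs
    · omega
    · exact Nat.succ_le_succ (ih _)

theorem pvCount_of_gt (limit : Int) (b : List Char) (rest : List (List Char)) (s : Int)
    (h : s > limit) : pvCount limit (b :: rest) s = 0 := by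
  have hb : (0 : Int) ≤ (PySem.Chars.len b : Int) := by simp [PySem.Chars.len_eq]
  simp only [pvCount]
  rw [if_pos (by omega)]

theorem pvPrefix_getD_zero (s : Int) (bs : List (List Char)) :
    (pvPrefix s bs).getD 0 0 = s := by
  cases bs <;> simp [pvPrefix]

-- Characterization: for 1 ≤ i ≤ |bs|, the i-th prefix length fits iff i ≤ the greedy count.
theorem pvPrefix_char (limit : Int) (bs : List (List Char)) (s : Int) (i : Nat)
    (h1 : 1 ≤ i) (h2 : i ≤ bs.length) :
    ((pvPrefix s bs).getD i 0 ≤ limit ↔ i ≤ pvCount limit bs s) := by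
  induction bs generalizing s i with
  | nil => simp at h2; omega
  | cons b rest ih =>
    have hgd : (pvPrefix s (b :: rest)).getD i 0 = (pvPrefix (s + (PySem.Chars.len b : Int) + 2) rest).getD (i - 1) 0 := by
      simp only [pvPrefix]
      obtain ⟨j, rfl⟩ : ∃ j, i = j + 1 := ⟨i - 1, by omega⟩
      simp
    rw [hgd]
    simp only [pvCount]
    by_cases hfit : s + 2 + (PySem.Chars.len b : Int) > limit
    · rw [if_pos hfit]
      rcases Nat.lt_or_ge i 2 with hi2 | hi2
      · have : i = 1 := by omega
        subst this
        simp only [Nat.sub_self, pvPrefix_getD_zero]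
        omega
      · -- i ≥ 2 so rest ≠ []; the shifted start already exceeds limit, so the count there is 0
        cases rest with
        | nil => simp at h2; omega
        | cons c r2 =>
          rw [ih _ (i - 1) (by omega) (by simp at h2 ⊢; omega)]
          rw [pvCount_of_gt _ _ _ _ (by omega)]
          omega
    · rw [if_neg hfit]
      rcases Nat.lt_or_ge i 2 with hi2 | hi2
      · have : i = 1 := by omega
        subst this
        simp only [Nat.sub_self, pvPrefix_getD_zero]
        constructor <;> intro <;> omega
      · rw [show s + (PySem.Chars.len b : Int) + 2 = s + 2 + (PySem.Chars.len b : Int) by ring,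
          ih _ (i - 1) (by omega) (by simp at h2 ⊢; omega)]
        omega

-- Binary-search correctness against any k with the monotone characterization on (lo, hi].
theorem pvBSearch_eq (pre : List Int) (limit : Int) (k : Nat) :
    ∀ lo hi, lo ≤ k → k ≤ hi →
      (∀ i, lo < i → i ≤ hi → (pre.getD i 0 ≤ limit ↔ i ≤ k)) →
      pvBSearch pre limit lo hi = k := by
  intro lo hi
  induction hgas : hi - lo using Nat.strong_induction_on generalizing lo hi with
  | _ n ih =>
    intro hlk hkh hchar
    rw [pvBSearch]
    by_cases hlh : lo < hi
    · rw [dif_pos hlh]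
      have hmid1 : lo < (lo + hi + 1) / 2 := by omega
      have hmid2 : (lo + hi + 1) / 2 ≤ hi := by omega
      by_cases hp : pre.getD ((lo + hi + 1) / 2) 0 ≤ limit
      · rw [if_pos hp]
        have hmk : (lo + hi + 1) / 2 ≤ k := (hchar _ hmid1 hmid2).mp hp
        exact ih (hi - (lo + hi + 1) / 2) (by omega) _ _ rfl hmk hkh
          (fun i h1 h2 => hchar i (by omega) h2)
      · rw [if_neg hp]
        have hmk : ¬ ((lo + hi + 1) / 2 ≤ k) := fun h => hp ((hchar _ hmid1 hmid2).mpr h)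
        exact ih ((lo + hi + 1) / 2 - 1 - lo) (by omega) _ _ rfl hlk (by omega)
          (fun i h1 h2 => hchar i h1 (by omega))
    · rw [dif_neg hlh]; omega

-- B's binary search over the prefix sums computes the greedy count.
theorem pvBSearch_eq_count (limit : Int) (bs : List (List Char)) (s : Int) :
    pvBSearch (pvPrefix s bs) limit 0 bs.length = pvCount limit bs s := by
  exact pvBSearch_eq _ _ _ 0 bs.length (Nat.zero_le _) (pvCount_le _ _ _)
    (fun i h1 h2 => pvPrefix_char limit bs s i h1 h2)

-- join over a nonempty list is head plus (sep ++ ·) of the tail.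
theorem pv_join_cons (sep x : List Char) (xs : List (List Char)) :
    PySem.Chars.join sep (x :: xs) = x ++ xs.flatMap (fun y => sep ++ y) := by
  induction xs generalizing x with
  | nil => simp [PySem.Chars.join_singleton]
  | cons y ys ih =>
    rw [PySem.Chars.join_cons_cons, ih]
    simp

theorem pv_cand_len (message blk : List Char) :
    (((message ++ ['\n', '\n'] ++ blk).length : Nat) : Int)
      = (message.length : Int) + 2 + (blk.length : Int) := by
  simp [List.length_append]
  ring

-- Once used ≥ 1, A's loop never takes the fallback; it appends exactly the blocks pvCount counts.
theorem pvALoop_pos (header : List Char) (limit : Int) (bs : List (List Char))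
    (message : List Char) (used : Int) (hu : 1 ≤ used) :
    pvALoop header limit bs message used =
      (message ++ (bs.take (pvCount limit bs (message.length : Int))).flatMap (fun b => '\n' :: '\n' :: b),
       used + (pvCount limit bs (message.length : Int) : Nat)) := by
  induction bs generalizing message used with
  | nil => simp [pvALoop, pvCount]
  | cons blk rest ih =>
    have hlen := pv_cand_len message blk
    simp only [pvALoop, pvCount, PySem.Chars.len]
    by_cases hfit : (((message ++ ['\n', '\n'] ++ blk).length : Nat) : Int) ≤ limit
    · rw [if_pos hfit, ih _ (used + 1) (by omega),
        if_neg (show ¬ ((message.length : Int) + 2 + (blk.length : Int) > limit) by omega),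
        hlen]
      simp only [List.take_succ_cons, List.flatMap_cons, Prod.mk.injEq]
      constructor
      · simp
      · push_cast; ring
    · rw [if_neg hfit, if_neg (show ¬ used = 0 by omega),
        if_pos (show (message.length : Int) + 2 + (blk.length : Int) > limit by omega)]
      simp

-- ===== VERDICT (by name: the statement is the Claim_ definition above) =====
theorem pack_blocks_to_limit_py_spec : Claim_equal_pack_blocks_to_limit_py := by
  intro header blocks limit _
  show _ = _
  unfold pack_blocks_to_limit_py pack_blocks_to_limit_py_alt
  simp only [pvBSearch_eq_count, PySem.Chars.len]
  cases hbs : blocks.map String.toList with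
  | nil => simp [pvALoop, pvCount, PySem.Chars.join_singleton]
  | cons b0 rest =>
    have hlen := pv_cand_len header.toList b0
    simp only [pvALoop, pvCount, PySem.Chars.len]
    by_cases hfit : (((header.toList ++ ['\n', '\n'] ++ b0).length : Nat) : Int) ≤ limit
    · rw [if_pos hfit,
        pvALoop_pos header.toList limit rest _ (0 + 1) (by norm_num),
        if_neg (show ¬ ((header.toList.length : Int) + 2 + (b0.length : Int) > limit) by omega),
        if_neg (by simp), hlen]
      simp only [pv_join_cons, List.take_succ_cons, List.flatMap_cons, Prod.mk.injEq]
      constructor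
      · simp
      · push_cast; ring
    · rw [if_neg hfit,
        if_pos (show (header.toList.length : Int) + 2 + (b0.length : Int) > limit by omega),
        if_pos (by simp)]
      simp only [List.headI_cons]
      by_cases hav : limit - (header.toList.length : Int) - 2 > 10
      · rw [if_pos hav, if_pos hav]
        simp
      · rw [if_neg hav, if_neg hav]
        simp
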